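-- pv_equiv track=rewrite | github.com/hoyeonkim795/solving | 4834.py | count
-- ===== SOURCE A (Python) =====
-- def count(N,data):
--     new_dict ={}
--     for k in data:
--         if k not in new_dict:
--             new_dict[k]= 1
--         else:
--             new_dict[k] += 1
--
--     result_list=[]
--     max_value = max(new_dict.values())
--     for (k,v) in new_dict.items():
--         if v==max_value:
--             result_list.append(k)
--
--     max_key = max(result_list)
--     result =f'{max_key} {max_value}'
--     return result
-- ===== SOURCE B (Python) =====
-- def count(N, data):
--     # Sort descending, then scan runs of equal values once; no dictionary at all.
--     # A strict '>' keeps the earliest (= largest) key among tied counts.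
--     s = sorted(data, reverse=True)
--     best_key = s[0]
--     best_cnt = 0
--     i = 0
--     n = len(s)
--     while i < n:
--         j = i
--         while j < n and s[j] == s[i]:
--             j += 1
--         if j - i > best_cnt:
--             best_cnt = j - i
--             best_key = s[i]
--         i = j
--     return f'{best_key} {best_cnt}'
-- ===== Notes on version B (the rewrite author's own statement) =====
-- stated objective: alternative
-- what changed: B drops the frequency dictionary entirely: it sorts the data descending and scans consecutive runs of equal values once, keeping the first run whose length strictly exceeds the best so far (strict > reproduces the largest-key tie-break).
import Mathlib
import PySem

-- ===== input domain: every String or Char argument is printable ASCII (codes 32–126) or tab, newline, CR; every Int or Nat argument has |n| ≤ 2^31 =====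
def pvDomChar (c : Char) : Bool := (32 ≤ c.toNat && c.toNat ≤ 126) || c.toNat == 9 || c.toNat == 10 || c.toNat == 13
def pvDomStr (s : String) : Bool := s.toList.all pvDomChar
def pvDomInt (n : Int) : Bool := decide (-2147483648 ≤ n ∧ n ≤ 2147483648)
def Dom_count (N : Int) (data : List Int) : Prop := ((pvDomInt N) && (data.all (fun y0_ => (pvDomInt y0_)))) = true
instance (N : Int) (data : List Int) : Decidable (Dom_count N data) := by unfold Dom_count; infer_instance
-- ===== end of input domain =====

-- B drops A's frequency dictionary: it sorts the data descending and scans consecutive runs of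
-- equal values once, keeping the first (= largest-key) run whose length strictly beats the best.


-- f'{k} {v}' built on List Char (exact; shared formatting helper of both ports)
def pvFmt (k v : Int) : String :=
  String.ofList (PySem.Int.toChars k ++ ' ' :: PySem.Int.toChars v)

-- ===== PORT A =====
def count (N : Int) (data : List Int) : String :=
  let newDict : PySem.Dict Int Int :=
    data.foldl (fun d k =>
      if !(d.contains k) then d.insert k 1 else d.insert k (d.getD k 0 + 1))
      PySem.Dict.empty
  match PySem.List.max? newDict.values (fun v => v) with
  | none => ""          -- Python: ValueError on an empty dict; excluded by Pre_
  | some maxValue =>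
    let resultList : List Int :=
      newDict.items.foldl (fun acc p => if p.2 == maxValue then acc ++ [p.1] else acc) []
    match PySem.List.max? resultList (fun k => k) with
    | none => ""        -- unreachable when the dict is nonempty
    | some maxKey => pvFmt maxKey maxValue

-- ===== PORT B =====
-- the inner `while j < n and s[j] == s[i]` loop: length of the leading run of x and the rest
def runSplit (x : Int) : List Int → Nat × List Int
  | [] => (0, [])
  | y :: t => if y == x then ((runSplit x t).1 + 1, (runSplit x t).2) else (0, y :: t)

lemma runSplit_snd_length (x : Int) (l : List Int) : (runSplit x l).2.length ≤ l.length := by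
  induction l with
  | nil => simp [runSplit]
  | cons y t ih =>
    by_cases h : y = x
    · simp only [runSplit, h]; simpa using Nat.le_succ_of_le ih
    · simp [runSplit, h]

-- the outer `while i < n` loop of B: run by run, keep (best_key, best_cnt), replace on strict >
def scanRuns : List Int → Int → Int → String
  | [], bk, bc => pvFmt bk bc
  | y :: t, bk, bc =>
    if bc < ((runSplit y t).1 : Int) + 1
    then scanRuns (runSplit y t).2 y (((runSplit y t).1 : Int) + 1)
    else scanRuns (runSplit y t).2 bk bc
termination_by l _ _ => l.length
decreasing_by
  · exact Nat.lt_succ_of_le (runSplit_snd_length _ _)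
  · exact Nat.lt_succ_of_le (runSplit_snd_length _ _)

def count_alt (N : Int) (data : List Int) : String :=
  match PySem.List.sorted data (fun x => x) true with
  | [] => ""            -- Python: IndexError on s[0]; excluded by Pre_
  | x :: t => scanRuns (x :: t) x 0

-- ===== PRECONDITION & SPEC =====
-- On empty data A raises ValueError (max() of an empty sequence) and B raises IndexError (s[0]);
-- Pre_ excludes data = [].
def Pre_count (N : Int) (data : List Int) : Prop := data ≠ []
instance (N : Int) (data : List Int) : Decidable (Pre_count N data) := by unfold Pre_count; infer_instance
def pvWitness_count : Int × List Int := (3, [1, 2, 2])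

def Spec_count (N : Int) (data : List Int) (out : String) : Prop := out = count_alt N data
instance (N : Int) (data : List Int) (out : String) : Decidable (Spec_count N data out) := by unfold Spec_count; infer_instance

-- ===== CLAIM (what is proved, stated in full; the proofs are below) =====
def Claim_equal_count : Prop := ∀ (N : Int) (data : List Int), Dom_count N data → Pre_count N data → Spec_count N data (count N data)

-- ===== LEMMAS AND PROOFS =====

-- 'a is lexicographically at most b' when pairs are compared by (count, key) = (snd, fst)
def lexLe (a b : Int × Int) : Prop := a.2 ≤ b.2 ∧ (a.2 = b.2 → a.1 ≤ b.1)

lemma lexLe_refl (a : Int × Int) : lexLe a a := ⟨le_refl _, fun _ => le_refl _⟩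

lemma lexLe_trans {a b c : Int × Int} (h1 : lexLe a b) (h2 : lexLe b c) : lexLe a c := by
  obtain ⟨h1, h1'⟩ := h1; obtain ⟨h2, h2'⟩ := h2
  refine ⟨le_trans h1 h2, fun h => ?_⟩
  have e1 : a.2 = b.2 := by omega
  have e2 : b.2 = c.2 := by omega
  exact le_trans (h1' e1) (h2' e2)

-- the unique answer both programs compute: a key of data with its count, lexicographically maximal
def Best (data : List Int) (p : Int × Int) : Prop :=
  p.1 ∈ data ∧ p.2 = (data.count p.1 : Int) ∧ ∀ k ∈ data, lexLe (k, (data.count k : Int)) p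

lemma best_unique {data : List Int} {p q : Int × Int} (hp : Best data p) (hq : Best data q) : p = q := by
  obtain ⟨hp1, hp2, hp3⟩ := hp
  obtain ⟨hq1, hq2, hq3⟩ := hq
  have h1 : lexLe q p := by
    have := hp3 q.1 hq1; rwa [← hq2] at this
  have h2 : lexLe p q := by
    have := hq3 p.1 hp1; rwa [← hp2] at this
  have e2 : p.2 = q.2 := le_antisymm h2.1 h1.1
  have e1 : p.1 = q.1 := le_antisymm (h2.2 e2) (h1.2 e2.symm)
  exact Prod.ext e1 e2

-- ---------- A side: the three passes after counting produce a lex-maximal item ----------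
lemma passes_best (l : List (Int × Int)) (hne : l ≠ []) :
    ∃ p : Int × Int, p ∈ l ∧ (∀ q ∈ l, lexLe q p) ∧
    (match PySem.List.max? (l.map (·.2)) (fun v => v) with
     | none => ""
     | some maxValue =>
       match PySem.List.max? (l.foldl (fun acc p => if p.2 == maxValue then acc ++ [p.1] else acc) []) (fun k => k) with
       | none => ""
       | some maxKey => pvFmt maxKey maxValue)
    = pvFmt p.1 p.2 := by
  obtain ⟨x, t, rfl⟩ := List.exists_cons_of_ne_nil hne
  have hmap : (x :: t).map (fun p : Int × Int => p.2) = x.2 :: t.map (·.2) := rfl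
  simp only [hmap, PySem.List.max?_id_cons]
  set M := (t.map (fun p : Int × Int => p.2)).foldl max x.2 with hM
  have hMmem : M = x.2 ∨ M ∈ t.map (·.2) := PySem.List.foldl_max_mem _ _
  have hMmax := PySem.List.le_foldl_max (t.map (fun p : Int × Int => p.2)) x.2
  rw [← hM] at hMmax
  rw [PySem.List.foldl_append_if (p := fun p : Int × Int => p.2 == M) (f := fun p : Int × Int => p.1)]
  simp only [List.nil_append]
  set rl := ((x :: t).filter (fun p => p.2 == M)).map (fun p : Int × Int => p.1) with hrl
  have hMpair : ∃ q ∈ x :: t, q.2 = M := by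
    rcases hMmem with h | h
    · exact ⟨x, List.mem_cons_self .., h.symm⟩
    · obtain ⟨q, hq, hq2⟩ := List.mem_map.mp h
      exact ⟨q, List.mem_cons_of_mem _ hq, hq2⟩
  have hvle : ∀ q ∈ x :: t, q.2 ≤ M := by
    intro q hq
    rcases List.mem_cons.mp hq with rfl | hq
    · exact hMmax.1
    · exact hMmax.2 q.2 (List.mem_map_of_mem hq)
  obtain ⟨q0, hq0, hq02⟩ := hMpair
  have hq0rl : q0.1 ∈ rl := by
    rw [hrl]; exact List.mem_map_of_mem (List.mem_filter.mpr ⟨hq0, by simp [hq02]⟩)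
  obtain ⟨r0, rs, hrl_eq⟩ := List.exists_cons_of_ne_nil (List.ne_nil_of_mem hq0rl)
  rw [hrl_eq, PySem.List.max?_id_cons]
  set K := rs.foldl max r0 with hK
  have hKmem : K = r0 ∨ K ∈ rs := PySem.List.foldl_max_mem _ _
  have hKmax := PySem.List.le_foldl_max rs r0
  rw [← hK] at hKmax
  have hKin : K ∈ rl := by
    rw [hrl_eq]
    rcases hKmem with h | h
    · rw [h]; exact List.mem_cons_self ..
    · exact List.mem_cons_of_mem _ h
  have hkle : ∀ k ∈ rl, k ≤ K := by
    intro k hk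
    rw [hrl_eq] at hk
    rcases List.mem_cons.mp hk with rfl | hk
    · exact hKmax.1
    · exact hKmax.2 k hk
  have hKM : (K, M) ∈ x :: t := by
    rw [hrl] at hKin
    obtain ⟨q, hq, hq1⟩ := List.mem_map.mp hKin
    have hf := List.mem_filter.mp hq
    have hq2 : q.2 = M := by simpa using hf.2
    have heq : q = (K, M) := by rw [← hq1, ← hq2]
    rw [heq] at hq
    exact (List.mem_filter.mp hq).1
  refine ⟨(K, M), hKM, ?_, rfl⟩
  intro q hq
  refine ⟨hvle q hq, fun hq2 => ?_⟩
  have : q.1 ∈ rl := by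
    rw [hrl]; exact List.mem_map_of_mem (List.mem_filter.mpr ⟨hq, by simp [hq2]⟩)
  exact hkle q.1 this

-- A returns pvFmt of a Best pair
lemma count_best (N : Int) (data : List Int) (hpre : data ≠ []) :
    ∃ p : Int × Int, Best data p ∧ count N data = pvFmt p.1 p.2 := by
  unfold count
  have hfun : (fun (d : PySem.Dict Int Int) k =>
      if !(d.contains k) then d.insert k 1 else d.insert k (d.getD k 0 + 1))
      = fun (d : PySem.Dict Int Int) k => d.insert k (d.getD k 0 + 1) := by
    funext d k
    by_cases h : d.contains k = true
    · simp [h]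
    · simp only [Bool.not_eq_true] at h
      simp [h, PySem.Dict.getD_of_not_contains (d := d) (k := k) (h := h)]
  simp only [hfun, PySem.Dict.foldl_insert_getD_add_one_eq_counter]
  have hitems : (PySem.Dict.counter data).items
      = (PySem.Set.ofList data).map (fun k => (k, (data.count k : Int))) :=
    PySem.Dict.items_counter data
  have hne : (PySem.Dict.counter data).items ≠ [] := by
    obtain ⟨d, ds, rfl⟩ := List.exists_cons_of_ne_nil hpre
    rw [hitems]
    have hd : d ∈ PySem.Set.ofList (d :: ds) := by
      rw [PySem.Set.mem_ofList]; exact List.mem_cons_self ..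
    exact List.ne_nil_of_mem (List.mem_map_of_mem (f := fun k => (k, ((d :: ds).count k : Int))) hd)
  obtain ⟨p, hpmem, hpmax, heq⟩ := passes_best (PySem.Dict.counter data).items hne
  refine ⟨p, ⟨?_, ?_, ?_⟩, by simpa only [PySem.Dict.values] using heq⟩
  · rw [hitems] at hpmem
    obtain ⟨k, hk, hk2⟩ := List.mem_map.mp hpmem
    rw [← hk2]
    exact (PySem.Set.mem_ofList _ _).mp hk
  · rw [hitems] at hpmem
    obtain ⟨k, hk, hk2⟩ := List.mem_map.mp hpmem
    rw [← hk2]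
  · intro k hk
    apply hpmax
    rw [hitems]
    exact List.mem_map_of_mem ((PySem.Set.mem_ofList _ _).mpr hk)

-- ---------- B side: runSplit facts ----------
lemma runSplit_append (x : Int) (l : List Int) :
    List.replicate (runSplit x l).1 x ++ (runSplit x l).2 = l := by
  induction l with
  | nil => rfl
  | cons y t ih =>
    by_cases h : y = x
    · subst h; simp only [runSplit, beq_self_eq_true, if_true, List.replicate_succ,
        List.cons_append, ih]
    · simp [runSplit, h]

lemma runSplit_lt (x : Int) (l : List Int)
    (h : List.Pairwise (fun a b => b ≤ a) (x :: l)) :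
    ∀ z ∈ (runSplit x l).2, z < x := by
  induction l with
  | nil => simp [runSplit]
  | cons y t ih =>
    by_cases hyx : y = x
    · subst hyx
      simp only [runSplit, beq_self_eq_true, if_true]
      apply ih
      exact h.sublist ((List.sublist_cons_self y t).cons₂ y)
    · simp only [runSplit, beq_iff_eq, hyx, if_false]
      intro z hz
      rcases List.pairwise_cons.mp h with ⟨hx, hyt⟩
      have hyx' : y < x := lt_of_le_of_ne (hx y (List.mem_cons_self ..)) hyx
      rcases List.mem_cons.mp hz with rfl | hz
      · exact hyx'
      · exact lt_of_le_of_lt ((List.pairwise_cons.mp hyt).1 z hz) hyx'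

lemma runSplit_sublist (x : Int) (l : List Int) : (runSplit x l).2.Sublist l := by
  conv_rhs => rw [← runSplit_append x l]
  exact List.sublist_append_right _ _

-- ---------- B side: the run scan computes the Best pair of its remaining input ----------
lemma scanRuns_spec : ∀ (n : ℕ) (l : List Int) (bk bc : Int), l.length ≤ n →
    List.Pairwise (fun a b => b ≤ a) l → (∀ y ∈ l, y < bk) →
    ∃ res : Int × Int, scanRuns l bk bc = pvFmt res.1 res.2 ∧
      (res = (bk, bc) ∨ (res.1 ∈ l ∧ res.2 = (l.count res.1 : Int) ∧ bc < res.2)) ∧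
      lexLe (bk, bc) res ∧ (∀ k ∈ l, lexLe (k, (l.count k : Int)) res) := by
  intro n
  induction n with
  | zero =>
    intro l bk bc hlen _ _
    have : l = [] := List.eq_nil_of_length_eq_zero (Nat.le_zero.mp hlen)
    subst this
    exact ⟨(bk, bc), by rw [scanRuns], Or.inl rfl, lexLe_refl _, by simp⟩
  | succ n ih =>
    intro l bk bc hlen hp hlt
    match l with
    | [] => exact ⟨(bk, bc), by rw [scanRuns], Or.inl rfl, lexLe_refl _, by simp⟩
    | y :: t =>
      set c := (runSplit y t).1 with hc
      set r := (runSplit y t).2 with hr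
      have hrep : List.replicate c y ++ r = t := runSplit_append y t
      have hltr : ∀ z ∈ r, z < y := runSplit_lt y t hp
      have hsub : r.Sublist t := runSplit_sublist y t
      have hpr : List.Pairwise (fun a b => b ≤ a) r :=
        ((List.pairwise_cons.mp hp).2).sublist hsub
      have hlenr : r.length ≤ n := by
        have hrl := runSplit_snd_length y t
        rw [← hr] at hrl
        simp only [List.length_cons] at hlen
        omega
      have hybk : y < bk := hlt y (List.mem_cons_self ..)
      -- counts of the list y :: t in terms of r
      have cnt_y : ((y :: t).count y : Int) = (c : Int) + 1 := by
        have hry : r.count y = 0 := by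
          rw [List.count_eq_zero]
          intro hmem
          exact absurd rfl (ne_of_lt (hltr y hmem))
        rw [List.count_cons_self, ← hrep, List.count_append, hry, List.count_replicate]
        simp
      have cnt_ne : ∀ k : Int, k ≠ y → (y :: t).count k = r.count k := by
        intro k hk
        rw [List.count_cons_of_ne (Ne.symm hk), ← hrep, List.count_append, List.count_replicate]
        simp [Ne.symm hk]
      have mem_r_of_mem_t : ∀ k : Int, k ∈ t → k ≠ y → k ∈ r := by
        intro k hk hne
        rw [← hrep] at hk
        rcases List.mem_append.mp hk with h | h
        · exact absurd (List.eq_of_mem_replicate h) hne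
        · exact h
      rw [scanRuns]
      by_cases hcond : bc < (c : Int) + 1
      · rw [if_pos hcond, ← hc, ← hr]
        obtain ⟨res, heq, hmem, hacc, hall⟩ := ih r y ((c : Int) + 1) hlenr hpr hltr
        refine ⟨res, heq, ?_, ?_, ?_⟩
        · rcases hmem with rfl | ⟨h1, h2, h3⟩
          · exact Or.inr ⟨List.mem_cons_self .., by simpa using cnt_y.symm, hcond⟩
          · refine Or.inr ⟨List.mem_cons_of_mem _ (hsub.mem h1), ?_, ?_⟩
            · rw [cnt_ne res.1 (ne_of_lt (hltr res.1 h1)), h2]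
            · omega
        · exact lexLe_trans ⟨le_of_lt hcond, fun h => absurd h (ne_of_lt hcond)⟩ hacc
        · intro k hk
          rcases List.mem_cons.mp hk with rfl | hk
          · rw [cnt_y]; exact hacc
          · by_cases hky : k = y
            · subst hky; rw [cnt_y]; exact hacc
            · rw [cnt_ne k hky]
              exact hall k (mem_r_of_mem_t k hk hky)
      · rw [if_neg hcond, ← hr]
        have hltr' : ∀ z ∈ r, z < bk := fun z hz => lt_trans (hltr z hz) hybk
        obtain ⟨res, heq, hmem, hacc, hall⟩ := ih r bk bc hlenr hpr hltr'
        have hc1 : (c : Int) + 1 ≤ bc := by omega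
        refine ⟨res, heq, ?_, hacc, ?_⟩
        · rcases hmem with rfl | ⟨h1, h2, h3⟩
          · exact Or.inl rfl
          · refine Or.inr ⟨List.mem_cons_of_mem _ (hsub.mem h1), ?_, h3⟩
            rw [cnt_ne res.1 (ne_of_lt (hltr res.1 h1)), h2]
        · intro k hk
          rcases List.mem_cons.mp hk with rfl | hk
          · rw [cnt_y]
            refine ⟨le_trans hc1 hacc.1, fun hres => ?_⟩
            rcases hmem with rfl | ⟨_, _, h3⟩
            · exact le_of_lt hybk
            · omega
          · by_cases hky : k = y
            · subst hky
              rw [cnt_y]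
              refine ⟨le_trans hc1 hacc.1, fun hres => ?_⟩
              rcases hmem with rfl | ⟨_, _, h3⟩
              · exact le_of_lt hybk
              · omega
            · rw [cnt_ne k hky]
              exact hall k (mem_r_of_mem_t k hk hky)

-- B returns pvFmt of a Best pair
lemma count_alt_best (N : Int) (data : List Int) (hpre : data ≠ []) :
    ∃ p : Int × Int, Best data p ∧ count_alt N data = pvFmt p.1 p.2 := by
  unfold count_alt
  have hperm : (PySem.List.sorted data (fun x => x) true).Perm data :=
    PySem.List.sorted_perm data (fun x => x) true
  have hcnt : ∀ k : Int, (PySem.List.sorted data (fun x => x) true).count k = data.count k :=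
    fun k => hperm.count_eq k
  have hpw : List.Pairwise (fun a b => b ≤ a) (PySem.List.sorted data (fun x => x) true) :=
    PySem.List.sorted_pairwise_rev data (fun x => x)
  have hsne : PySem.List.sorted data (fun x => x) true ≠ [] := by
    intro h
    rw [h] at hperm
    exact hpre hperm.symm.eq_nil
  match hs : PySem.List.sorted data (fun x => x) true with
  | [] => exact absurd hs hsne
  | x :: t =>
    rw [hs] at hcnt hpw hperm
    -- first outer iteration: run of x, count c+1 > 0 always
    show ∃ p, Best data p ∧ scanRuns (x :: t) x 0 = pvFmt p.1 p.2
    rw [scanRuns.eq_def]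
    simp only []
    set c := (runSplit x t).1 with hc
    set r := (runSplit x t).2 with hr
    have hltr : ∀ z ∈ r, z < x := runSplit_lt x t hpw
    have hsub : r.Sublist t := runSplit_sublist x t
    have hrep : List.replicate c x ++ r = t := runSplit_append x t
    have hpos : (0 : Int) < (c : Int) + 1 := by positivity
    rw [if_pos hpos]
    obtain ⟨res, heq, hmem, hacc, hall⟩ := scanRuns_spec r.length
      r x ((c : Int) + 1) (le_refl _)
      (((List.pairwise_cons.mp hpw).2).sublist hsub) hltr
    have cnt_x : ((x :: t).count x : Int) = (c : Int) + 1 := by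
      have hry : r.count x = 0 := by
        rw [List.count_eq_zero]
        intro hmemx
        exact absurd rfl (ne_of_lt (hltr x hmemx))
      rw [List.count_cons_self, ← hrep, List.count_append, hry, List.count_replicate]
      simp
    have cnt_ne : ∀ k : Int, k ≠ x → (x :: t).count k = r.count k := by
      intro k hk
      rw [List.count_cons_of_ne (Ne.symm hk), ← hrep, List.count_append, List.count_replicate]
      simp [Ne.symm hk]
    have mem_r_of_mem_t : ∀ k : Int, k ∈ t → k ≠ x → k ∈ r := by
      intro k hk hne
      rw [← hrep] at hk
      rcases List.mem_append.mp hk with h | h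
      · exact absurd (List.eq_of_mem_replicate h) hne
      · exact h
    refine ⟨res, ⟨?_, ?_, ?_⟩, heq⟩
    · rcases hmem with rfl | ⟨h1, _, _⟩
      · exact hperm.subset (List.mem_cons_self ..)
      · exact hperm.subset (List.mem_cons_of_mem _ (hsub.mem h1))
    · rcases hmem with rfl | ⟨h1, h2, _⟩
      · show ((c : Int) + 1) = ((data.count x : Nat) : Int)
        rw [← hcnt x]
        exact cnt_x.symm
      · rw [← hcnt res.1, cnt_ne res.1 (ne_of_lt (hltr res.1 h1)), h2]
    · intro k hk
      have hk' : k ∈ x :: t := hperm.symm.subset hk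
      rw [← hcnt k]
      rcases List.mem_cons.mp hk' with rfl | hkt
      · rw [cnt_x]; exact hacc
      · by_cases hkx : k = x
        · subst hkx; rw [cnt_x]; exact hacc
        · rw [cnt_ne k hkx]
          exact hall k (mem_r_of_mem_t k hkt hkx)

-- ===== VERDICT (by name: the statement is the Claim_ definition above) =====
theorem count_spec : Claim_equal_count := by
  intro N data _ hpre
  unfold Spec_count
  obtain ⟨p, hpA, heqA⟩ := count_best N data hpre
  obtain ⟨q, hqB, heqB⟩ := count_alt_best N data hpre
  rw [heqA, heqB, best_unique hpA hqB]
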